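-- pv_equiv track=rewrite | github.com/pypi-data/pypi-mirror-399 | packages/janus-quantum/janus_quantum-1.0.2-py3-none-any.whl/janus/simulator/density_matrix.py | _compute_index
-- ===== SOURCE A (Python) =====
-- from typing import List, Optional, Union, Dict, Tuple
--
-- def _compute_index(
--
--     qarg_bits: int,
--     other_bits: int,
--     qargs: List[int],
--     n: int
-- ) -> int:
--     """计算全系统索引"""
--     result = 0
--     other_idx = 0
--     qarg_idx = 0
--
--     for q in range(n):
--         if q in qargs:
--             bit = (qarg_bits >> qargs.index(q)) & 1
--         else:
--             bit = (other_bits >> other_idx) & 1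
--             other_idx += 1
--         result |= (bit << q)
--
--     return result
-- ===== SOURCE B (Python) =====
-- def _compute_index(qarg_bits, other_bits, qargs, n):
--     # build first-occurrence position map once
--     pos = {}
--     for i, q in enumerate(qargs):
--         pos.setdefault(q, i)
--     # scatter qarg bits
--     result = 0
--     for q, i in pos.items():
--         if 0 <= q < n:
--             result |= ((qarg_bits >> i) & 1) << q
--     # fill remaining positions with other bits
--     other_idx = 0
--     for q in range(n):
--         if q not in pos:
--             result |= ((other_bits >> other_idx) & 1) << q
--             other_idx += 1
--     return result
-- ===== Notes on version B (the rewrite author's own statement) =====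
-- stated objective: alternative
-- what changed: A gathers bits in one interleaved pass doing 'q in qargs' and 'qargs.index(q)' scans per position; B builds a first-occurrence position dict once, scatters the qarg bits over the dict items in one pass, then fills the remaining positions from other_bits in a second pass.
import Mathlib
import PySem

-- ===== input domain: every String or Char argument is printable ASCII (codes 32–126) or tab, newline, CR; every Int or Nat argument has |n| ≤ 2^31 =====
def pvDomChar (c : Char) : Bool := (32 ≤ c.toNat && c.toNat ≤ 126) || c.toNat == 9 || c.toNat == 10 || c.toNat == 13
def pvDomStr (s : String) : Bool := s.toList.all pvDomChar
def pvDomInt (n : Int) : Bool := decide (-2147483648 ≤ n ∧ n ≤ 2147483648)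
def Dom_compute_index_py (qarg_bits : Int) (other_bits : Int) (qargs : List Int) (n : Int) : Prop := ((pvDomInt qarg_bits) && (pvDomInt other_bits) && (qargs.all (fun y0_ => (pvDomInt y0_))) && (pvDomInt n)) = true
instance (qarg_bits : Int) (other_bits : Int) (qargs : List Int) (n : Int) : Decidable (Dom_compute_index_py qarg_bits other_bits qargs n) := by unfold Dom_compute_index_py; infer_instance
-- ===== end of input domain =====

-- B replaces A's interleaved per-position scans of qargs with a first-occurrence
-- position map built once, a scatter pass over the map, and a fill pass (alternative decomposition).

-- ===== PORT A =====
def compute_index_py (qarg_bits : Int) (other_bits : Int) (qargs : List Int) (n : Int) : Int :=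
  ((PySem.List.pyRange 0 n 1).foldl
    (fun (st : Int × Nat) q =>
      if qargs.contains q then
        (PySem.Int.bor st.1 ((PySem.Int.band (qarg_bits >>> ((PySem.List.index? qargs q).getD 0)) 1) <<< q.toNat), st.2)
      else
        (PySem.Int.bor st.1 ((PySem.Int.band (other_bits >>> st.2) 1) <<< q.toNat), st.2 + 1))
    ((0 : Int), (0 : Nat))).1

-- ===== PORT B =====
def pvPos (qargs : List Int) : PySem.Dict Int Int :=
  (PySem.List.enumerate qargs 0).foldl (fun d p => d.setdefault p.2 p.1) PySem.Dict.empty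

def compute_index_py_alt (qarg_bits : Int) (other_bits : Int) (qargs : List Int) (n : Int) : Int :=
  let pos := pvPos qargs
  let result : Int := pos.items.foldl
    (fun (r : Int) (p : Int × Int) =>
      if 0 ≤ p.1 ∧ p.1 < n then
        PySem.Int.bor r ((PySem.Int.band (qarg_bits >>> p.2.toNat) 1) <<< p.1.toNat)
      else r) 0
  ((PySem.List.pyRange 0 n 1).foldl
    (fun (st : Int × Nat) q =>
      if pos.contains q then st
      else (PySem.Int.bor st.1 ((PySem.Int.band (other_bits >>> st.2) 1) <<< q.toNat), st.2 + 1))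
    (result, (0 : Nat))).1

-- ===== PRECONDITION & SPEC =====
def Spec_compute_index_py (qarg_bits : Int) (other_bits : Int) (qargs : List Int) (n : Int) (out : Int) : Prop := out = compute_index_py_alt qarg_bits other_bits qargs n
instance (qarg_bits : Int) (other_bits : Int) (qargs : List Int) (n : Int) (out : Int) : Decidable (Spec_compute_index_py qarg_bits other_bits qargs n out) := by unfold Spec_compute_index_py; infer_instance

-- ===== CLAIM (what is proved, stated in full; the proofs are below) =====
def Claim_equal_compute_index_py : Prop := ∀ (qarg_bits : Int) (other_bits : Int) (qargs : List Int) (n : Int), Dom_compute_index_py qarg_bits other_bits qargs n → Spec_compute_index_py qarg_bits other_bits qargs n (compute_index_py qarg_bits other_bits qargs n)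

-- ===== LEMMAS AND PROOFS =====

-- the qarg bit placed at position q, as a Nat
def pvQT (qb : Int) (qargs : List Int) (q : Int) : Nat :=
  (PySem.Int.band (qb >>> ((PySem.List.index? qargs q).getD 0)) 1).toNat <<< q.toNat

-- the other bit number c placed at position q, as a Nat
def pvOT (ob : Int) (c : Nat) (q : Int) : Nat :=
  (PySem.Int.band (ob >>> c) 1).toNat <<< q.toNat

-- A's loop, as a Nat-level recursion on the number of processed positions
def pvA (qb ob : Int) (qargs : List Int) : Nat → Nat × Nat
  | 0 => (0, 0)
  | m + 1 =>
    let p := pvA qb ob qargs m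
    if qargs.contains (m : Int) then (p.1 ||| pvQT qb qargs m, p.2)
    else (p.1 ||| pvOT ob p.2 m, p.2 + 1)

-- B's fill pass, as a Nat-level recursion
def pvF (ob : Int) (qargs : List Int) : Nat → Nat × Nat
  | 0 => (0, 0)
  | m + 1 =>
    let p := pvF ob qargs m
    if qargs.contains (m : Int) then p
    else (p.1 ||| pvOT ob p.2 m, p.2 + 1)

-- B's scatter, restricted to positions < m, as a Nat-level recursion
def pvS (qb : Int) (qargs : List Int) : Nat → Nat
  | 0 => 0
  | m + 1 =>
    if qargs.contains (m : Int) then pvS qb qargs m ||| pvQT qb qargs m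
    else pvS qb qargs m

theorem pv_band1_nonneg (x : Int) : 0 ≤ PySem.Int.band x 1 := by
  rw [PySem.Int.band_comm]
  exact PySem.Int.band_nonneg_of_nonneg_left x (by norm_num)

theorem pv_band1_cast (x : Int) : PySem.Int.band x 1 = ((PySem.Int.band x 1).toNat : Int) :=
  (Int.toNat_of_nonneg (pv_band1_nonneg x)).symm

theorem pv_shl_cast (m k : Nat) : ((m : Int) <<< k) = ((m <<< k : Nat) : Int) := by
  simp [Int.shiftLeft_eq, Nat.shiftLeft_eq]

theorem pv_term_cast (x : Int) (k : Nat) :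
    (PySem.Int.band x 1) <<< k = (((PySem.Int.band x 1).toNat <<< k : Nat) : Int) := by
  conv_lhs => rw [pv_band1_cast, pv_shl_cast]

theorem pv_bor_cast (r t : Nat) : PySem.Int.bor (r : Int) (t : Int) = ((r ||| t : Nat) : Int) :=
  PySem.Int.bor_natCast r t

-- pyRange 0 n 1 only depends on n.toNat
theorem pv_range_toNat (n : Int) : PySem.List.pyRange 0 n 1 = PySem.List.pyRange 0 (n.toNat : Int) 1 := by
  by_cases h : 0 ≤ n
  · rw [Int.toNat_of_nonneg h]
  · rw [PySem.List.pyRange_one_eq_nil (by omega), PySem.List.pyRange_one_eq_nil (by omega)]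

-- pvPos lookups are first-occurrence indices
theorem pvPos_append (l : List Int) (x : Int) :
    pvPos (l ++ [x]) = (pvPos l).setdefault x (l.length : Int) := by
  unfold pvPos
  rw [PySem.List.enumerate_append, List.foldl_append]
  simp [PySem.List.enumerate]

theorem pvPos_get? (l : List Int) (q : Int) :
    (pvPos l).get? q = (PySem.List.index? l q).map (fun k => (k : Int)) := by
  induction l using List.reverseRecOn generalizing q with
  | nil => simp [pvPos, PySem.List.enumerate, PySem.List.index?_eq_idxOf?]
  | append_singleton l x ih =>
    rw [pvPos_append]
    by_cases hm : x ∈ l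
    · have hc : (pvPos l).contains x = true := by
        rw [PySem.Dict.contains_eq_isSome_get?, ih]
        obtain ⟨k, hk⟩ := Option.isSome_iff_exists.mp ((PySem.List.index?_isSome_iff l x).mpr hm)
        simp only [PySem.List.index?_eq_idxOf?] at hk
        simp [hk]
      rw [PySem.Dict.setdefault_of_contains _ _ hc]
      by_cases hq : q ∈ l
      · rw [ih, PySem.List.index?_append_of_mem [x] hq]
      · have hqx : q ≠ x := fun h => hq (h ▸ hm)
        rw [ih, (PySem.List.index?_eq_none_iff l q).mpr hq,
          (PySem.List.index?_eq_none_iff (l ++ [x]) q).mpr (by simp [hq, hqx])]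
    · have hc : (pvPos l).contains x = false := by
        rw [PySem.Dict.contains_eq_isSome_get?, ih,
          (PySem.List.index?_eq_none_iff l x).mpr hm]
        rfl
      rw [PySem.Dict.setdefault_of_not_contains _ _ hc]
      by_cases hq : q = x
      · subst hq
        rw [PySem.Dict.get?_insert_self, PySem.List.index?_append_singleton_self l q hm]
        rfl
      · rw [PySem.Dict.get?_insert_of_ne _ _ hq, ih]
        by_cases hql : q ∈ l
        · rw [PySem.List.index?_append_of_mem [x] hql]
        · rw [(PySem.List.index?_eq_none_iff l q).mpr hql,
            (PySem.List.index?_eq_none_iff (l ++ [x]) q).mpr (by simp [hql, hq])]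

theorem pvPos_contains (l : List Int) (q : Int) :
    (pvPos l).contains q = l.contains q := by
  rw [PySem.Dict.contains_eq_isSome_get?, pvPos_get?, Bool.eq_iff_iff]
  by_cases h : q ∈ l
  · obtain ⟨k, hk⟩ := Option.isSome_iff_exists.mp ((PySem.List.index?_isSome_iff l q).mpr h)
    simp only [PySem.List.index?_eq_idxOf?] at hk
    simp [hk, h]
  · rw [(PySem.List.index?_eq_none_iff l q).mpr h]
    simp [h]

theorem pvPos_keys (l : List Int) : (pvPos l).keys = PySem.Set.ofList l := by
  induction l using List.reverseRecOn with
  | nil => simp [pvPos, PySem.List.enumerate, PySem.Dict.keys_empty, PySem.Set.ofList_nil]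
  | append_singleton l x ih =>
    rw [pvPos_append, PySem.Dict.keys_setdefault, pvPos_contains, ih,
      PySem.Set.ofList_append_singleton, PySem.Set.add_eq_ite]
    by_cases h : x ∈ l
    · simp [h, PySem.Set.mem_ofList]
    · simp [h, PySem.Set.mem_ofList]

-- characterization of A's loop
theorem pvA_char (qb ob : Int) (qargs : List Int) (m : Nat) :
    (PySem.List.pyRange 0 (m : Int) 1).foldl
      (fun (st : Int × Nat) q =>
        if qargs.contains q then
          (PySem.Int.bor st.1 ((PySem.Int.band (qb >>> ((PySem.List.index? qargs q).getD 0)) 1) <<< q.toNat), st.2)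
        else
          (PySem.Int.bor st.1 ((PySem.Int.band (ob >>> st.2) 1) <<< q.toNat), st.2 + 1))
      ((0 : Int), (0 : Nat))
    = (((pvA qb ob qargs m).1 : Int), (pvA qb ob qargs m).2) := by
  induction m with
  | zero =>
    rw [PySem.List.pyRange_one_eq_nil (by norm_num)]
    simp [pvA]
  | succ m ih =>
    have hcast : ((m + 1 : Nat) : Int) = (m : Int) + 1 := by push_cast; ring
    rw [hcast, PySem.List.pyRange_one_succ_right (by exact_mod_cast Nat.zero_le m),
      List.foldl_append, ih]
    simp only [List.foldl_cons, List.foldl_nil]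
    by_cases hc : qargs.contains (m : Int)
    · have hm : ((m : Nat) : Int) ∈ qargs := by simpa using hc
      simp only [hc, if_true]
      rw [pv_term_cast, pv_bor_cast]
      simp [pvA, pvQT, hm]
    · have hm : ((m : Nat) : Int) ∉ qargs := by simpa using hc
      simp only [hc]
      simp [pvA, pvOT, hm]
      rw [pv_term_cast, pv_bor_cast]

-- characterization of B's fill pass from an arbitrary Nat start value
theorem pvB_char (ob : Int) (qargs : List Int) (S : Nat) (m : Nat) :
    (PySem.List.pyRange 0 (m : Int) 1).foldl
      (fun (st : Int × Nat) q =>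
        if (pvPos qargs).contains q then st
        else (PySem.Int.bor st.1 ((PySem.Int.band (ob >>> st.2) 1) <<< q.toNat), st.2 + 1))
      ((S : Int), (0 : Nat))
    = (((S ||| (pvF ob qargs m).1 : Nat) : Int), (pvF ob qargs m).2) := by
  induction m with
  | zero =>
    rw [PySem.List.pyRange_one_eq_nil (by norm_num)]
    simp [pvF]
  | succ m ih =>
    have hcast : ((m + 1 : Nat) : Int) = (m : Int) + 1 := by push_cast; ring
    rw [hcast, PySem.List.pyRange_one_succ_right (by exact_mod_cast Nat.zero_le m),
      List.foldl_append, ih]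
    simp only [List.foldl_cons, List.foldl_nil]
    rw [pvPos_contains]
    by_cases hc : qargs.contains (m : Int)
    · have hm : ((m : Nat) : Int) ∈ qargs := by simpa using hc
      simp [pvF, hm]
    · have hm : ((m : Nat) : Int) ∉ qargs := by simpa using hc
      simp only [hc]
      simp [pvF, pvOT, hm]
      rw [pv_term_cast, pv_bor_cast]
      simp [Nat.lor_assoc]

-- Nat transfer of a bor-accumulating fold
theorem pv_foldBor_cast (qb : Int) (qargs : List Int) (l : List Int) (m : Nat) :
    l.foldl (fun r q =>
        PySem.Int.bor r ((PySem.Int.band (qb >>> ((PySem.List.index? qargs q).getD 0)) 1) <<< q.toNat))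
      ((m : Nat) : Int)
    = ((l.foldl (fun r q => r ||| pvQT qb qargs q) m : Nat) : Int) := by
  induction l generalizing m with
  | nil => rfl
  | cons x xs ih =>
    simp only [List.foldl_cons]
    rw [pv_term_cast, pv_bor_cast, ih]
    rfl

-- the filtered-range fold is pvS
theorem pv_filter_fold (qb : Int) (qargs : List Int) (m : Nat) :
    (((PySem.List.pyRange 0 (m : Int) 1).filter (fun q => qargs.contains q)).foldl
      (fun r q => r ||| pvQT qb qargs q) 0) = pvS qb qargs m := by
  induction m with
  | zero =>
    rw [PySem.List.pyRange_one_eq_nil (by norm_num)]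
    simp [pvS]
  | succ m ih =>
    have hcast : ((m + 1 : Nat) : Int) = (m : Int) + 1 := by push_cast; ring
    rw [hcast, PySem.List.pyRange_one_succ_right (by exact_mod_cast Nat.zero_le m),
      List.filter_append, List.foldl_append, ih]
    by_cases hm : ((m : Nat) : Int) ∈ qargs <;> simp [pvS, hm]

-- B's scatter over the dict items equals pvS at n.toNat
theorem pvScatter_char (qb : Int) (qargs : List Int) (n : Int) :
    ((pvPos qargs).items.foldl
      (fun (r : Int) (p : Int × Int) =>
        if 0 ≤ p.1 ∧ p.1 < n then
          PySem.Int.bor r ((PySem.Int.band (qb >>> p.2.toNat) 1) <<< p.1.toNat)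
        else r) 0)
    = ((pvS qb qargs n.toNat : Nat) : Int) := by
  have hnodup : (pvPos qargs).keys.Nodup := by
    rw [pvPos_keys]; exact PySem.Set.nodup_ofList qargs
  -- 1: drop the non-selected items via filter
  have h1 : ((pvPos qargs).items.foldl
      (fun (r : Int) (p : Int × Int) =>
        if 0 ≤ p.1 ∧ p.1 < n then
          PySem.Int.bor r ((PySem.Int.band (qb >>> p.2.toNat) 1) <<< p.1.toNat)
        else r) 0)
      = (((pvPos qargs).items.filter (fun p => decide (0 ≤ p.1 ∧ p.1 < n))).foldl
          (fun (r : Int) (p : Int × Int) =>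
            PySem.Int.bor r ((PySem.Int.band (qb >>> p.2.toNat) 1) <<< p.1.toNat)) 0) := by
    rw [List.foldl_filter]
    apply PySem.List.foldl_congr_mem
    intro acc p _
    by_cases h : 0 ≤ p.1 ∧ p.1 < n <;> simp [h]
  -- 2: each selected item's value is the first-occurrence index of its key
  have h2 : (((pvPos qargs).items.filter (fun p => decide (0 ≤ p.1 ∧ p.1 < n))).foldl
          (fun (r : Int) (p : Int × Int) =>
            PySem.Int.bor r ((PySem.Int.band (qb >>> p.2.toNat) 1) <<< p.1.toNat)) 0)
      = (((pvPos qargs).items.filter (fun p => decide (0 ≤ p.1 ∧ p.1 < n))).foldl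
          (fun (r : Int) (p : Int × Int) =>
            PySem.Int.bor r ((PySem.Int.band (qb >>> ((PySem.List.index? qargs p.1).getD 0)) 1) <<< p.1.toNat)) 0) := by
    apply PySem.List.foldl_congr_mem
    intro acc p hp
    have hp' : p ∈ (pvPos qargs).items := List.mem_of_mem_filter hp
    have hget : (pvPos qargs).get? p.1 = some p.2 := by
      obtain ⟨a, b⟩ := p
      exact PySem.Dict.get?_of_mem_items _ hp' hnodup
    rw [pvPos_get?] at hget
    cases hidx : PySem.List.index? qargs p.1 with
    | none => rw [hidx] at hget; simp at hget
    | some k =>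
      rw [hidx] at hget
      have hk : p.2 = (k : Int) := by
        simpa using hget.symm
      rw [hk]
      simp
  -- 3: the fold only reads the keys
  have h3 : (((pvPos qargs).items.filter (fun p => decide (0 ≤ p.1 ∧ p.1 < n))).foldl
          (fun (r : Int) (p : Int × Int) =>
            PySem.Int.bor r ((PySem.Int.band (qb >>> ((PySem.List.index? qargs p.1).getD 0)) 1) <<< p.1.toNat)) 0)
      = ((((pvPos qargs).items.filter (fun p => decide (0 ≤ p.1 ∧ p.1 < n))).map (fun p => p.1)).foldl
          (fun (r : Int) (q : Int) =>
            PySem.Int.bor r ((PySem.Int.band (qb >>> ((PySem.List.index? qargs q).getD 0)) 1) <<< q.toNat)) 0) := by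
    rw [List.foldl_map]
  -- the key list is a permutation of the filtered range
  have hK : ((((pvPos qargs).items.filter (fun p => decide (0 ≤ p.1 ∧ p.1 < n))).map (fun p => p.1)).Nodup) := by
    have hs : (((pvPos qargs).items.filter (fun p => decide (0 ≤ p.1 ∧ p.1 < n))).map (fun p => p.1)).Sublist
        ((pvPos qargs).items.map (fun p => p.1)) :=
      List.Sublist.map _ List.filter_sublist
    have hnodup' : ((pvPos qargs).items.map (fun p => p.1)).Nodup := by
      simpa [PySem.Dict.keys] using hnodup
    exact List.Nodup.sublist hs hnodup'
  have hR : ((PySem.List.pyRange 0 n 1).filter (fun q => qargs.contains q)).Nodup :=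
    List.Nodup.filter _ (PySem.List.nodup_pyRange_one 0 n)
  have hmem : ∀ q : Int,
      q ∈ (((pvPos qargs).items.filter (fun p => decide (0 ≤ p.1 ∧ p.1 < n))).map (fun p => p.1))
      ↔ q ∈ ((PySem.List.pyRange 0 n 1).filter (fun q => qargs.contains q)) := by
    intro q
    constructor
    · intro hq
      obtain ⟨p, hpf, hpq⟩ := List.mem_map.mp hq
      obtain ⟨hpi, hcond⟩ := List.mem_filter.mp hpf
      have hcond' : 0 ≤ p.1 ∧ p.1 < n := by simpa using hcond
      have hkeys : p.1 ∈ (pvPos qargs).keys := by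
        simp only [PySem.Dict.keys]
        exact List.mem_map_of_mem hpi
      have hqa : p.1 ∈ qargs := by
        rw [pvPos_keys, PySem.Set.mem_ofList] at hkeys
        exact hkeys
      subst hpq
      refine List.mem_filter.mpr ⟨(PySem.List.mem_pyRange_one).mpr ⟨hcond'.1, hcond'.2⟩, ?_⟩
      simpa using hqa
    · intro hq
      obtain ⟨hqr, hcond⟩ := List.mem_filter.mp hq
      have hqa : q ∈ qargs := by simpa using hcond
      obtain ⟨h0, h1'⟩ := (PySem.List.mem_pyRange_one).mp hqr
      obtain ⟨k, hk⟩ := Option.isSome_iff_exists.mp ((PySem.List.index?_isSome_iff qargs q).mpr hqa)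
      have hget : (pvPos qargs).get? q = some ((k : Nat) : Int) := by
        rw [pvPos_get?, hk]; rfl
      have hitem : (q, ((k : Nat) : Int)) ∈ (pvPos qargs).items :=
        PySem.Dict.mem_items_of_get?_eq_some _ hget
      refine List.mem_map.mpr ⟨(q, ((k : Nat) : Int)), List.mem_filter.mpr ⟨hitem, ?_⟩, rfl⟩
      simp [h0, h1']
  have hperm : ((((pvPos qargs).items.filter (fun p => decide (0 ≤ p.1 ∧ p.1 < n))).map (fun p => p.1)).Perm
      ((PySem.List.pyRange 0 n 1).filter (fun q => qargs.contains q))) :=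
    (List.perm_ext_iff_of_nodup hK hR).mpr hmem
  -- 4: transfer to Nat and reorder along the permutation
  rw [h1, h2, h3]
  have h4 := pv_foldBor_cast qb qargs
      ((((pvPos qargs).items.filter (fun p => decide (0 ≤ p.1 ∧ p.1 < n))).map (fun p => p.1))) 0
  simp only [Nat.cast_zero] at h4
  rw [h4]
  have h5 : ((((pvPos qargs).items.filter (fun p => decide (0 ≤ p.1 ∧ p.1 < n))).map (fun p => p.1)).foldl
        (fun r q => r ||| pvQT qb qargs q) 0)
      = (((PySem.List.pyRange 0 n 1).filter (fun q => qargs.contains q)).foldl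
        (fun r q => r ||| pvQT qb qargs q) 0) :=
    List.Perm.foldl_eq (rcomm := ⟨fun b a₁ a₂ => by
      rw [Nat.lor_assoc, Nat.lor_comm (pvQT qb qargs a₁), ← Nat.lor_assoc]⟩) hperm 0
  rw [h5, pv_range_toNat n, pv_filter_fold]

-- the main interleaving identity
theorem pv_main (qb ob : Int) (qargs : List Int) (m : Nat) :
    pvA qb ob qargs m = (pvS qb qargs m ||| (pvF ob qargs m).1, (pvF ob qargs m).2) := by
  induction m with
  | zero => simp [pvA, pvF, pvS]
  | succ m ih =>
    simp only [pvA, pvF, pvS, ih]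
    by_cases hc : qargs.contains (m : Int)
    · simp only [hc, if_true]
      refine Prod.ext ?_ rfl
      show (pvS qb qargs m ||| (pvF ob qargs m).1) ||| pvQT qb qargs m
        = (pvS qb qargs m ||| pvQT qb qargs m) ||| (pvF ob qargs m).1
      rw [Nat.lor_assoc, Nat.lor_comm ((pvF ob qargs m).1), ← Nat.lor_assoc]
    · simp only [hc]
      refine Prod.ext ?_ rfl
      show (pvS qb qargs m ||| (pvF ob qargs m).1) ||| pvOT ob (pvF ob qargs m).2 m
        = pvS qb qargs m ||| ((pvF ob qargs m).1 ||| pvOT ob (pvF ob qargs m).2 m)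
      rw [Nat.lor_assoc]

-- ===== VERDICT (by name: the statement is the Claim_ definition above) =====
theorem compute_index_py_spec : Claim_equal_compute_index_py := by
  intro qb ob qargs n _
  have hA : compute_index_py qb ob qargs n = (((pvA qb ob qargs n.toNat).1 : Nat) : Int) := by
    simp only [compute_index_py]
    rw [pv_range_toNat n, pvA_char qb ob qargs n.toNat]
  have hB : compute_index_py_alt qb ob qargs n
      = (((pvS qb qargs n.toNat ||| (pvF ob qargs n.toNat).1 : Nat) : Nat) : Int) := by
    simp only [compute_index_py_alt]
    rw [pvScatter_char qb qargs n, pv_range_toNat n, pvB_char ob qargs (pvS qb qargs n.toNat) n.toNat]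
  unfold Spec_compute_index_py
  rw [hA, hB, pv_main]
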